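-- pv_equiv track=rewrite | github.com/mpsonntag/snippets | python/bc/tojson.py | convert_posters
-- ===== SOURCE A (Python) =====
-- from typing import Dict, List, Any
--
-- def convert_posters(lines: List[List[str]]) -> List[Dict[str, str]]:
--     fieldnames = lines[0]
--     content = lines[1:]
--
--     data: List[Dict[str, str]] = list()
--     for row in content:
--         # stop at blank rows
--         if not "".join(row):
--             break
--
--         record: Dict[str, str] = dict()
--         for key, value in zip(fieldnames, row):
--             key = key.lower()
--             # don't copy emails
--             if "email" in key:
--                 continue
--             # lot of dirty workarounds and fixes
--             if key == "abstract number old":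
--                 continue
--             if "abstract no" in key:
--                 key = "abstract_number"
--             if key == "abstract_number":
--                 value = value.lstrip("0")  # remove leading 0s
--             record[key] = value
--
--         data.append(record)
--
--     return data
-- ===== SOURCE B (Python) =====
-- def convert_posters(lines):
--     # Column-major re-implementation: truncate the data at the first blank row,
--     # then fill all records one COLUMN at a time.  Correct because each record is
--     # updated independently and, within a record, keys are still inserted in
--     # column order (so dict insertion order and last-wins duplicates match the
--     # row-major original).
--     header, rows = lines[0], lines[1:]
--
--     # truncate at the first blank row
--     n = 0
--     while n < len(rows) and "".join(rows[n]):
--         n += 1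
--     rows = rows[:n]
--
--     # sweep column by column
--     records = [dict() for _ in rows]
--     for j, key in enumerate(header):
--         key = key.lower()
--         if "email" in key or key == "abstract number old":
--             continue
--         if "abstract no" in key:
--             key = "abstract_number"
--         strip = key == "abstract_number"
--         for rec, row in zip(records, rows):
--             if j < len(row):
--                 v = row[j]
--                 rec[key] = v.lstrip("0") if strip else v
--     return records
-- ===== Notes on version B (the rewrite author's own statement) =====
-- stated objective: alternative
-- what changed: B transposes the traversal: it first truncates the data at the first blank row with a counting while-loop, then fills all record dicts COLUMN by column (one pass over the header with an inner pass over the rows) instead of A's row-by-row rebuild of the key logic; correct because records are independent and per-record insertion order is still column order.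
import Mathlib
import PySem

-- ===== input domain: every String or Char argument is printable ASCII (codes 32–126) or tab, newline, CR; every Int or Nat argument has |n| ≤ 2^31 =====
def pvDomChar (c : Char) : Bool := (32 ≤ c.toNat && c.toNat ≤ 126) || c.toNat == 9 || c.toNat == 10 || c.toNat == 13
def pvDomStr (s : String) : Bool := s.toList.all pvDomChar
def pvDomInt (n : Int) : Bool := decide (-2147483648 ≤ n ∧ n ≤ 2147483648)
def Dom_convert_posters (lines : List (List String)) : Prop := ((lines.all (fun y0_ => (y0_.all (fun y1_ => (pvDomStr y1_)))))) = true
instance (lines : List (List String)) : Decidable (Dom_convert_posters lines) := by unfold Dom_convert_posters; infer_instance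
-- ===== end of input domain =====

-- B transposes the traversal (truncate at first blank row, then fill records column by column);
-- objective: alternative decomposition, same asymptotic cost.

-- exact port of value.lstrip("0"): drop leading '0' characters (PySem has no lstrip-with-chars primitive)
def pvLstrip0 (s : String) : String := String.ofList (s.toList.dropWhile (fun c => c == '0'))

-- ===== PORT A =====
def pvRecordA (fieldnames row : List String) : PySem.Dict String String :=
  (fieldnames.zip row).foldl (fun record kv =>
    let key := PySem.Str.lower kv.1
    if PySem.Str.isIn "email" key then record
    else if key == "abstract number old" then record
    else
      let key := if PySem.Str.isIn "abstract no" key then "abstract_number" else key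
      let value := if key == "abstract_number" then pvLstrip0 kv.2 else kv.2
      record.insert key value) PySem.Dict.empty

def pvLoopA (fieldnames : List String) : List (List String) → List (List (String × String))
  | [] => []
  | row :: rest =>
    if PySem.Str.join "" row == "" then []
    else (pvRecordA fieldnames row).items :: pvLoopA fieldnames rest

def convert_posters (lines : List (List String)) : List (List (String × String)) :=
  match lines with
  | [] => []  -- lines[0] raises IndexError in Python; excluded by Pre_
  | fieldnames :: content => pvLoopA fieldnames content

-- ===== PORT B =====
-- 'while n < len(rows) and "".join(rows[n]): n += 1' — the length of the non-blank prefix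
def pvCountNonBlank : List (List String) → Nat
  | [] => 0
  | r :: t => if PySem.Str.join "" r == "" then 0 else pvCountNonBlank t + 1

-- inner body: 'if j < len(row): rec[key] = row[j].lstrip("0") if strip else row[j]'
def pvColStep (j : Nat) (key : String) (strip : Bool)
    (rec : PySem.Dict String String) (row : List String) : PySem.Dict String String :=
  match PySem.List.pyGet? row (Int.ofNat j) with
  | some v => rec.insert key (if strip then pvLstrip0 v else v)
  | none => rec

-- 'for j, key in enumerate(header): … for rec, row in zip(records, rows): …'
def pvFill (rows : List (List String)) : Nat → List String →
    List (PySem.Dict String String) → List (PySem.Dict String String)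
  | _, [], recs => recs
  | j, key0 :: ks, recs =>
    let key := PySem.Str.lower key0
    if PySem.Str.isIn "email" key || key == "abstract number old" then
      pvFill rows (j+1) ks recs
    else
      let key := if PySem.Str.isIn "abstract no" key then "abstract_number" else key
      let strip := key == "abstract_number"
      pvFill rows (j+1) ks (List.zipWith (pvColStep j key strip) recs rows)

def convert_posters_alt (lines : List (List String)) : List (List (String × String)) :=
  match lines with
  | [] => []  -- lines[0] raises IndexError in Python; excluded by Pre_
  | header :: rest =>
    let rows := rest.take (pvCountNonBlank rest)
    (pvFill rows 0 header (rows.map (fun _ => PySem.Dict.empty))).map PySem.Dict.items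

-- ===== PRECONDITION & SPEC =====
-- Pre_ excludes only the empty list, on which both Pythons raise IndexError at lines[0].
def Pre_convert_posters (lines : List (List String)) : Prop := lines ≠ []
instance (lines : List (List String)) : Decidable (Pre_convert_posters lines) := by unfold Pre_convert_posters; infer_instance
def pvWitness_convert_posters : List (List String) := [["Name", "Abstract No"], ["Ann", "007"]]

def Spec_convert_posters (lines : List (List String)) (out : List (List (String × String))) : Prop := out = convert_posters_alt lines
instance (lines : List (List String)) (out : List (List (String × String))) : Decidable (Spec_convert_posters lines out) := by unfold Spec_convert_posters; infer_instance

-- ===== CLAIM (what is proved, stated in full; the proofs are below) =====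
def Claim_equal_convert_posters : Prop := ∀ (lines : List (List String)), Dom_convert_posters lines → Pre_convert_posters lines → Spec_convert_posters lines (convert_posters lines)

-- ===== LEMMAS AND PROOFS =====

-- per-row counterpart of pvFill, used only in the proof
def pvRowFrom (row : List String) : Nat → List String → PySem.Dict String String → PySem.Dict String String
  | _, [], rec => rec
  | j, key0 :: ks, rec =>
    let key := PySem.Str.lower key0
    if PySem.Str.isIn "email" key || key == "abstract number old" then
      pvRowFrom row (j+1) ks rec
    else
      let key := if PySem.Str.isIn "abstract no" key then "abstract_number" else key
      let strip := key == "abstract_number"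
      pvRowFrom row (j+1) ks (pvColStep j key strip rec row)

-- zipWith of a cell step with mapped initial records acts on each record independently
theorem pv_zipWith_map {α β : Type} (g : β → α → β) (rows : List α) (f : α → β) :
    List.zipWith g (rows.map f) rows = rows.map (fun r => g (f r) r) := by
  induction rows with
  | nil => rfl
  | cons r rs ih => simp only [List.map_cons, List.zipWith_cons_cons, ih]

-- the column sweep is the per-row sweep applied to every record independently
theorem pv_fill_map (rows : List (List String)) (ks : List String) :
    ∀ (j : Nat) (f : List String → PySem.Dict String String),
    pvFill rows j ks (rows.map f) = rows.map (fun row => pvRowFrom row j ks (f row)) := by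
  induction ks with
  | nil => intro j f; rfl
  | cons k ks ih =>
    intro j f
    simp only [pvFill, pvRowFrom]
    split
    · exact ih (j+1) f
    · rw [pv_zipWith_map]
      exact ih (j+1) _

-- the per-row index sweep equals A's fold over the zipped (key, value) pairs
theorem pv_row_eq (row : List String) (ks : List String) :
    ∀ (j : Nat) (rec : PySem.Dict String String),
    pvRowFrom row j ks rec = (ks.zip (row.drop j)).foldl (fun record kv =>
      let key := PySem.Str.lower kv.1
      if PySem.Str.isIn "email" key then record
      else if key == "abstract number old" then record
      else
        let key := if PySem.Str.isIn "abstract no" key then "abstract_number" else key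
        let value := if key == "abstract_number" then pvLstrip0 kv.2 else kv.2
        record.insert key value) rec := by
  induction ks with
  | nil => intro j rec; rfl
  | cons k ks ih =>
    intro j rec
    have hget : PySem.List.pyGet? row (Int.ofNat j) = (row.drop j).head? := by
      rw [show (Int.ofNat j) = ((j : Nat) : Int) from rfl, PySem.List.pyGet?_natCast,
          ← List.head?_drop]
    have hdrop : row.drop (j+1) = (row.drop j).drop 1 := by
      rw [List.drop_drop]
    cases hd : row.drop j with
    | nil =>
      have hnone : PySem.List.pyGet? row (Int.ofNat j) = none := by rw [hget, hd]; rfl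
      have hrest : row.drop (j+1) = [] := by rw [hdrop, hd]; rfl
      simp only [pvRowFrom, pvColStep, hnone, List.zip_nil_right, List.foldl_nil, ih, hrest]
      split <;> simp
    | cons v rest =>
      have hsome : PySem.List.pyGet? row (Int.ofNat j) = some v := by rw [hget, hd]; rfl
      have hrest : row.drop (j+1) = rest := by rw [hdrop, hd]; rfl
      simp only [pvRowFrom, pvColStep, hsome, List.zip_cons_cons, List.foldl_cons, ih, hrest]
      by_cases h1 : PySem.Str.isIn "email" (PySem.Str.lower k) = true <;>
        by_cases h2 : (PySem.Str.lower k == "abstract number old") = true <;>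
          simp_all

-- the truncated map over rows equals A's break-loop
theorem pv_take_eq (fieldnames : List String) (content : List (List String)) :
    (content.take (pvCountNonBlank content)).map
      (fun row => (pvRecordA fieldnames row).items) = pvLoopA fieldnames content := by
  induction content with
  | nil => rfl
  | cons r t ih =>
    simp only [pvCountNonBlank, pvLoopA]
    split
    · rfl
    · simp only [List.take_succ_cons, List.map_cons, ih]

-- ===== VERDICT (by name: the statement is the Claim_ definition above) =====
theorem convert_posters_spec : Claim_equal_convert_posters := by
  intro lines _ hpre
  unfold Spec_convert_posters convert_posters convert_posters_alt
  match lines with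
  | [] => exact absurd rfl hpre
  | fieldnames :: content =>
    simp only []
    rw [pv_fill_map, List.map_map, ← pv_take_eq fieldnames content]
    apply List.map_congr_left
    intro row _
    simp only [Function.comp]
    rw [pv_row_eq row fieldnames 0 PySem.Dict.empty, List.drop_zero]
    rfl
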